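-- pv_equiv track=rewrite | github.com/HamidMolareza/QueraProblems | Solutions/33034/python3/program.py | coloring
-- ===== SOURCE A (Python) =====
-- def coloring(ls):
--     alent = len(ls)
--     blent = len(ls[0])
--     clent = len(ls[0][0])
--
--     for i in range(alent):
--         for j in range(blent):
--             for k in range(clent):
--                 if (
--                         (i != 0 and i != alent - 1)
--                         and (1 <= j <= blent - 2)
--                         and (1 <= k <= clent - 2)
--                 ):
--                     ls[i][j][k] = 0
--                 else:
--                     ls[i][j][k] = 1
--     return ls
-- ===== SOURCE B (Python) =====
-- def coloring(ls):
--     alent = len(ls)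
--     blent = len(ls[0])
--     clent = len(ls[0][0])
--
--     # pass 1: everything becomes 1
--     for i in range(alent):
--         for j in range(blent):
--             for k in range(clent):
--                 ls[i][j][k] = 1
--
--     # pass 2: the interior box becomes 0
--     for i in range(1, alent - 1):
--         for j in range(1, blent - 1):
--             for k in range(1, clent - 1):
--                 ls[i][j][k] = 0
--
--     return ls
-- ===== Notes on version B (the rewrite author's own statement) =====
-- stated objective: simpler
-- what changed: replaces A's per-cell boundary test with two unconditional passes: fill every cell with 1, then overwrite the smaller interior box with 0 in a second triple loop over shrunken ranges
import Mathlib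
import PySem

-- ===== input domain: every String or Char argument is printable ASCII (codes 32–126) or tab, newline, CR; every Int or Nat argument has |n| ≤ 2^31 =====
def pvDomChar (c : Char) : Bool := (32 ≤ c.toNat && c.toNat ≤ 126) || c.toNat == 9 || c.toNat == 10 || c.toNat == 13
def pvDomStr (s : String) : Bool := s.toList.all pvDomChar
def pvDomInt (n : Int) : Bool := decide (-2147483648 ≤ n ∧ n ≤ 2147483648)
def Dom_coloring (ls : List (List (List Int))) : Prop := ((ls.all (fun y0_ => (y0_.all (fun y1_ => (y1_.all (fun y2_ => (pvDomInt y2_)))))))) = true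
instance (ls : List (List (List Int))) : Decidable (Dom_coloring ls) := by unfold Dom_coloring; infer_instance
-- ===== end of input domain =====

-- B replaces A's per-cell boundary test with two unconditional passes (fill all with 1, then
-- zero the interior box); same return value wherever A returns. Both Pythons mutate ls in place
-- and return it; under Pre_ the final mutated state (= the return value) is the same.

-- ===== PORT A =====
-- ls[0] / ls[0][0] are read as headD []; Python raises IndexError on empty input, which
-- Pre_coloring excludes.  Python's `ls[i][j][k] = v` is modeled by List.modify / List.set
-- (a no-op out of range; Python raises there, excluded by Pre_coloring).
def coloring (ls : List (List (List Int))) : List (List (List Int)) :=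
  let alent := ls.length
  let blent := (ls.headD []).length
  let clent := ((ls.headD []).headD []).length
  (List.range alent).foldl (fun acc i =>
    (List.range blent).foldl (fun acc j =>
      (List.range clent).foldl (fun acc k =>
        acc.modify i (fun p => p.modify j (fun r =>
          r.set k (if (i ≠ 0 ∧ i ≠ alent - 1) ∧ (1 ≤ j ∧ j ≤ blent - 2) ∧ (1 ≤ k ∧ k ≤ clent - 2) then 0 else 1)))) acc) acc) ls

-- ===== PORT B =====
-- Python's range(1, n-1) over nonnegative n is List.range' 1 (n - 1 - 1) (Nat subtraction:
-- empty when n ≤ 2, exactly as Python's range is empty when n - 1 ≤ 1).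
def coloring_alt (ls : List (List (List Int))) : List (List (List Int)) :=
  let alent := ls.length
  let blent := (ls.headD []).length
  let clent := ((ls.headD []).headD []).length
  let filled := (List.range alent).foldl (fun acc i =>
    (List.range blent).foldl (fun acc j =>
      (List.range clent).foldl (fun acc k =>
        acc.modify i (fun p => p.modify j (fun r => r.set k 1))) acc) acc) ls
  (List.range' 1 (alent - 1 - 1)).foldl (fun acc i =>
    (List.range' 1 (blent - 1 - 1)).foldl (fun acc j =>
      (List.range' 1 (clent - 1 - 1)).foldl (fun acc k =>
        acc.modify i (fun p => p.modify j (fun r => r.set k 0))) acc) acc) filled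

-- ===== PRECONDITION & SPEC =====
-- Pre_coloring holds exactly on the inputs where Python A returns (A raises IndexError on [],
-- on [[], …], and — when clent ≥ 1 — on grids with a plane shorter than blent or one of a
-- plane's first blent rows shorter than clent).
def Pre_coloring (ls : List (List (List Int))) : Prop :=
  ls ≠ [] ∧ ls.headD [] ≠ [] ∧
    (((ls.headD []).headD []).length = 0 ∨
      ∀ p ∈ ls, (ls.headD []).length ≤ p.length ∧
        ∀ r ∈ p.take (ls.headD []).length, ((ls.headD []).headD []).length ≤ r.length)
instance (ls : List (List (List Int))) : Decidable (Pre_coloring ls) := by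
  unfold Pre_coloring; infer_instance

def pvWitness_coloring : List (List (List Int)) :=
  [[[5, 6, 7], [8, 9, 10], [11, 12, 13]],
   [[1, 2, 3], [4, 5, 6], [7, 8, 9]],
   [[0, 0, 0], [0, 0, 0], [0, 0, 0]]]

def Spec_coloring (ls : List (List (List Int))) (out : List (List (List Int))) : Prop := out = coloring_alt ls
instance (ls : List (List (List Int))) (out : List (List (List Int))) : Decidable (Spec_coloring ls out) := by unfold Spec_coloring; infer_instance

-- ===== CLAIM (what is proved, stated in full; the proofs are below) =====
def Claim_equal_coloring : Prop := ∀ (ls : List (List (List Int))), Dom_coloring ls → Pre_coloring ls → Spec_coloring ls (coloring ls)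

-- ===== LEMMAS AND PROOFS =====

theorem pvModify_id {α : Type} (l : List α) (i : Nat) : l.modify i (fun x => x) = l := by
  apply List.ext_getElem (by simp)
  intro j h1 h2
  simp [List.getElem_modify]

theorem pvModify_modify {α : Type} (l : List α) (i : Nat) (f g : α → α) :
    (l.modify i f).modify i g = l.modify i (fun x => g (f x)) := by
  apply List.ext_getElem (by simp)
  intro j h1 h2
  simp only [List.getElem_modify]
  split <;> simp_all

theorem pvSet_eq_modify {α : Type} (l : List α) (i : Nat) (v : α) :
    l.set i v = l.modify i (fun _ => v) := by
  apply List.ext_getElem (by simp)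
  intro j h1 h2
  simp [List.getElem_modify, List.getElem_set]

theorem pvFoldl_modify {α β : Type} (L : List β) (l : List α) (i : Nat) (h : β → α → α) :
    L.foldl (fun acc x => acc.modify i (h x)) l
      = l.modify i (fun y => L.foldl (fun y x => h x y) y) := by
  induction L generalizing l with
  | nil => simp [pvModify_id]
  | cons x L ih => simp [ih, pvModify_modify]

theorem pvFoldl_range_modify {α : Type} (n : Nat) (F : Nat → α → α) (l : List α) :
    (List.range n).foldl (fun acc i => acc.modify i (F i)) l
      = l.mapIdx (fun i x => if i < n then F i x else x) := by
  induction n with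
  | zero =>
    apply List.ext_getElem (by simp)
    intro j h1 h2
    simp [List.getElem_mapIdx]
  | succ n ih =>
    rw [List.range_succ, List.foldl_append, ih]
    apply List.ext_getElem (by simp)
    intro j h1 h2
    simp only [List.foldl_cons, List.foldl_nil, List.getElem_modify, List.getElem_mapIdx]
    split_ifs <;> first | rfl | omega | (subst_vars; simp_all)

theorem pvFoldl_range'_modify {α : Type} (n s : Nat) (F : Nat → α → α) (l : List α) :
    (List.range' s n).foldl (fun acc i => acc.modify i (F i)) l
      = l.mapIdx (fun i x => if s ≤ i ∧ i < s + n then F i x else x) := by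
  induction n generalizing s l with
  | zero =>
    apply List.ext_getElem (by simp)
    intro j h1 h2
    simp [List.getElem_mapIdx]
  | succ n ih =>
    rw [List.range'_succ, List.foldl_cons, ih]
    apply List.ext_getElem (by simp)
    intro j h1 h2
    simp only [List.getElem_mapIdx, List.getElem_modify]
    split_ifs <;> first | rfl | omega | simp_all

theorem pvMapIdx_congr {α β : Type} (l : List α) (f g : Nat → α → β)
    (h : ∀ i (hi : i < l.length), f i l[i] = g i l[i]) : l.mapIdx f = l.mapIdx g := by
  apply List.ext_getElem (by simp)
  intro j h1 h2
  simp only [List.getElem_mapIdx]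
  exact h j (by simp at h1; omega)

theorem coloring_spec : Claim_equal_coloring := by
  intro ls _ _
  unfold Spec_coloring coloring coloring_alt
  simp only [pvSet_eq_modify, pvFoldl_modify, pvFoldl_range_modify, pvFoldl_range'_modify,
    List.mapIdx_mapIdx]
  apply pvMapIdx_congr
  intro i hi
  simp only [Function.comp]
  rw [if_pos hi, if_pos hi]
  by_cases hcB : 1 ≤ i ∧ i < 1 + (ls.length - 1 - 1)
  · rw [if_pos hcB, List.mapIdx_mapIdx]
    apply pvMapIdx_congr
    intro j hj
    simp only [Function.comp]
    by_cases hj2 : 1 ≤ j ∧ j < 1 + ((ls.headD []).length - 1 - 1)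
    · rw [if_pos hj2, if_pos (show j < (ls.headD []).length by omega),
        if_pos (show j < (ls.headD []).length by omega), List.mapIdx_mapIdx]
      apply pvMapIdx_congr
      intro k hk
      simp only [Function.comp]
      split_ifs <;> first | rfl | omega
    · rw [if_neg hj2]
      by_cases hjb : j < (ls.headD []).length
      · rw [if_pos hjb, if_pos hjb]
        apply pvMapIdx_congr
        intro k hk
        split_ifs <;> first | rfl | omega
      · rw [if_neg hjb, if_neg hjb]
  · rw [if_neg hcB]
    apply pvMapIdx_congr
    intro j hj
    by_cases hjb : j < (ls.headD []).length
    · rw [if_pos hjb, if_pos hjb]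
      apply pvMapIdx_congr
      intro k hk
      split_ifs <;> first | rfl | omega
    · rw [if_neg hjb, if_neg hjb]

-- ===== VERDICT (by name: the statement is the Claim_ definition above) =====
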